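-- pv_equiv track=rewrite | github.com/oouyang/xsw | scripts/analyze_puzzles.py | compute_pocket_score
-- ===== SOURCE A (Python) =====
-- from collections import deque
--
-- PLAYER_PIECE_SIZES = frozenset({4, 5, 6, 8, 9, 10, 12})
--
-- def get_4neighbors(cell):
--     """Return 4-adjacent neighbors of cell on 8x8 board."""
--     r, c = divmod(cell, 8)
--     neighbors = []
--     if r > 0:
--         neighbors.append((r - 1) * 8 + c)
--     if r < 7:
--         neighbors.append((r + 1) * 8 + c)
--     if c > 0:
--         neighbors.append(r * 8 + c - 1)
--     if c < 7:
--         neighbors.append(r * 8 + c + 1)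
--     return neighbors
--
-- def flood_fill_count(free_cells_set, start):
--     """Flood fill from start, return set of reachable cells."""
--     visited = set()
--     queue = deque([start])
--     visited.add(start)
--     while queue:
--         cell = queue.popleft()
--         for nb in get_4neighbors(cell):
--             if nb in free_cells_set and nb not in visited:
--                 visited.add(nb)
--                 queue.append(nb)
--     return visited
--
-- def compute_pocket_score(grey_cells):
--     """Count connected regions of free cells whose size doesn't match any piece size."""
--     grey_set = set(grey_cells)
--     free = set(range(64)) - grey_set
--     visited = set()
--     bad_pockets = 0
--
--     for cell in free:
--         if cell in visited:
--             continue
--         region = flood_fill_count(free, cell)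
--         visited |= region
--         if len(region) not in PLAYER_PIECE_SIZES:
--             bad_pockets += 1
--
--     return bad_pockets
-- ===== SOURCE B (Python) =====
-- PLAYER_PIECE_SIZES = frozenset({4, 5, 6, 8, 9, 10, 12})
--
-- def compute_pocket_score(grey_cells):
--     """Count connected regions of free cells whose size doesn't match any piece size,
--     via union-find over the free cells instead of BFS flood fill."""
--     grey = set(grey_cells)
--     free = [c for c in range(64) if c not in grey]
--     free_set = set(free)
--     parent = {c: c for c in free}
--
--     def find(x):
--         while parent[x] != x:
--             x = parent[x]
--         return x
--
--     def union(a, b):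
--         ra, rb = find(a), find(b)
--         if ra != rb:
--             if ra < rb:
--                 parent[ra] = rb
--             else:
--                 parent[rb] = ra
--
--     for c in free:
--         if c % 8 < 7 and c + 1 in free_set:
--             union(c, c + 1)
--         if c // 8 < 7 and c + 8 in free_set:
--             union(c, c + 8)
--
--     sizes = {}
--     for c in free:
--         r = find(c)
--         sizes[r] = sizes.get(r, 0) + 1
--
--     return sum(1 for s in sizes.values() if s not in PLAYER_PIECE_SIZES)
-- ===== Notes on version B (the rewrite author's own statement) =====
-- stated objective: alternative
-- what changed: Replaced per-region BFS flood fill (deque + visited set) with union-find over the free cells: each free cell is unioned with its free right/down neighbour (smaller root re-parented to the larger), then component sizes are tallied per root and the roots with a non-piece size are counted.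
import Mathlib
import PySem

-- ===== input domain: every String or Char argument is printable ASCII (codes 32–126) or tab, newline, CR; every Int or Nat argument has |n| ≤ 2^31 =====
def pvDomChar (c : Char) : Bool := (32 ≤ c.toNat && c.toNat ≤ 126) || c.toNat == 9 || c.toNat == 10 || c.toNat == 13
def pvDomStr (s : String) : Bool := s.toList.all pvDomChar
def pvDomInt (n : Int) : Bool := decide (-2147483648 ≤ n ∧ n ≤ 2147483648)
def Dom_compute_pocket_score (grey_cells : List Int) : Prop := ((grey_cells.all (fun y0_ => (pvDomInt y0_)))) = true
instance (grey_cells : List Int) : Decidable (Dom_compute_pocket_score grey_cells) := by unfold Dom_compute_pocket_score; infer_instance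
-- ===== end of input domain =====

-- B replaces A's per-region BFS flood fill by union-find over the free cells (alternative algorithm, same result).


def PLAYER_PIECE_SIZES : List Int := [4, 5, 6, 8, 9, 10, 12]

-- ===== PORT A =====
def get_4neighbors (cell : Int) : List Int :=
  let r := PySem.Int.floordiv cell 8
  let c := PySem.Int.mod cell 8
  ((((if r > 0 then [(r - 1) * 8 + c] else []) ++
     (if r < 7 then [(r + 1) * 8 + c] else [])) ++
     (if c > 0 then [r * 8 + c - 1] else [])) ++
     (if c < 7 then [r * 8 + c + 1] else []))

-- BFS while-loop; fuel 200 exceeds the proven potential bound (≤ 2*64 + 1)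
def floodLoop (free : PySem.Set Int) : Nat → PySem.Set Int → List Int → PySem.Set Int
  | 0, visited, _ => visited
  | _ + 1, visited, [] => visited
  | fuel + 1, visited, cell :: queue =>
      let st := (get_4neighbors cell).foldl
        (fun (st : PySem.Set Int × List Int) nb =>
          if PySem.Set.contains free nb && !(PySem.Set.contains st.1 nb) then
            (PySem.Set.add st.1 nb, st.2 ++ [nb])
          else st) (visited, queue)
      floodLoop free fuel st.1 st.2

def flood_fill_count (free : PySem.Set Int) (start : Int) : PySem.Set Int :=
  floodLoop free 200 (PySem.Set.add PySem.Set.empty start) [start]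

def compute_pocket_score (grey_cells : List Int) : Int :=
  let grey_set := PySem.Set.ofList grey_cells
  let free := PySem.Set.diff (PySem.Set.ofList (PySem.List.pyRange 0 64 1)) grey_set
  let res := free.foldl
    (fun (st : PySem.Set Int × Int) cell =>
      if PySem.Set.contains st.1 cell then st
      else
        let region := flood_fill_count free cell
        (PySem.Set.union st.1 region,
         if !(PLAYER_PIECE_SIZES.contains (PySem.List.len region)) then st.2 + 1 else st.2))
    (PySem.Set.empty, 0)
  res.2

-- ===== PORT B =====
-- find: parent[x] is always present when called (parent is keyed by all free cells), so getD's default is never used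
def find_root (parent : PySem.Dict Int Int) : Nat → Int → Int
  | 0, x => x
  | fuel + 1, x =>
      let px := parent.getD x x
      if px ≠ x then find_root parent fuel px else x

def uf_union (parent : PySem.Dict Int Int) (a b : Int) : PySem.Dict Int Int :=
  let ra := find_root parent 64 a
  let rb := find_root parent 64 b
  if ra ≠ rb then
    if ra < rb then parent.insert ra rb else parent.insert rb ra
  else parent

def compute_pocket_score_alt (grey_cells : List Int) : Int :=
  let grey := PySem.Set.ofList grey_cells
  let free := (PySem.List.pyRange 0 64 1).filter (fun c => !(PySem.Set.contains grey c))
  let free_set := PySem.Set.ofList free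
  let parent0 := free.foldl (fun (d : PySem.Dict Int Int) c => d.insert c c) PySem.Dict.empty
  let parent := free.foldl
    (fun d c =>
      let d1 := if PySem.Int.mod c 8 < 7 && PySem.Set.contains free_set (c + 1) then uf_union d c (c + 1) else d
      if PySem.Int.floordiv c 8 < 7 && PySem.Set.contains free_set (c + 8) then uf_union d1 c (c + 8) else d1)
    parent0
  let sizes := free.foldl
    (fun (d : PySem.Dict Int Int) c =>
      let r := find_root parent 64 c
      d.insert r (d.getD r 0 + 1)) PySem.Dict.empty
  ((sizes.values.filter (fun s => !(PLAYER_PIECE_SIZES.contains s))).length : Int)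

-- ===== PRECONDITION & SPEC =====
def Spec_compute_pocket_score (grey_cells : List Int) (out : Int) : Prop := out = compute_pocket_score_alt grey_cells
instance (grey_cells : List Int) (out : Int) : Decidable (Spec_compute_pocket_score grey_cells out) := by unfold Spec_compute_pocket_score; infer_instance

-- ===== CLAIM (what is proved, stated in full; the proofs are below) =====
def Claim_equal_compute_pocket_score : Prop := ∀ (grey_cells : List Int), Dom_compute_pocket_score grey_cells → Spec_compute_pocket_score grey_cells (compute_pocket_score grey_cells)

-- ===== LEMMAS AND PROOFS =====
-- ===== basic notions =====
def Estep (fr : List Int) (x y : Int) : Prop := y ∈ fr ∧ y ∈ get_4neighbors x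
def Rr (fr : List Int) : Int → Int → Prop := Relation.ReflTransGen (Estep fr)

def frOf (grey_cells : List Int) : List Int :=
  (PySem.List.pyRange 0 64 1).filter (fun c => !(PySem.Set.contains (PySem.Set.ofList grey_cells) c))

lemma mem_nbrs_iff (x y : Int) (hx0 : 0 ≤ x) (hx1 : x < 64) :
    y ∈ get_4neighbors x ↔
      ((8 ≤ x ∧ y = x - 8) ∨ (x < 56 ∧ y = x + 8) ∨
       (0 < x % 8 ∧ y = x - 1) ∨ (x % 8 < 7 ∧ y = x + 1)) := by
  have h8 : (0:Int) < 8 := by norm_num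
  simp only [get_4neighbors, PySem.Int.floordiv_eq_ediv_of_pos h8, PySem.Int.mod_eq_emod_of_pos h8,
    List.mem_append]
  constructor
  · intro h
    rcases h with ((h | h) | h) | h <;> (split_ifs at h <;> simp_all <;> omega)
  · intro h
    rcases h with ⟨h1, h2⟩ | ⟨h1, h2⟩ | ⟨h1, h2⟩ | ⟨h1, h2⟩
    · left; left; left; rw [if_pos (by omega)]; simp; omega
    · left; left; right; rw [if_pos (by omega)]; simp; omega
    · left; right; rw [if_pos (by omega)]; simp; omega
    · right; rw [if_pos (by omega)]; simp; omega

lemma nbrs_bound {x y : Int} (hx0 : 0 ≤ x) (hx1 : x < 64) (h : y ∈ get_4neighbors x) :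
    0 ≤ y ∧ y < 64 := by
  rw [mem_nbrs_iff x y hx0 hx1] at h
  omega

lemma nbrs_symm {x y : Int} (hx0 : 0 ≤ x) (hx1 : x < 64) (h : y ∈ get_4neighbors x) :
    x ∈ get_4neighbors y := by
  have hb := nbrs_bound hx0 hx1 h
  rw [mem_nbrs_iff x y hx0 hx1] at h
  rw [mem_nbrs_iff y x hb.1 hb.2]
  omega
lemma frOf_nodup (g : List Int) : (frOf g).Nodup :=
  (PySem.List.nodup_pyRange_one 0 64).filter _

lemma frOf_bound (g : List Int) : ∀ x ∈ frOf g, 0 ≤ x ∧ x < 64 := by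
  intro x hx
  have := List.of_mem_filter hx
  have hm := List.mem_of_mem_filter hx
  rw [PySem.List.mem_pyRange_one] at hm
  exact hm

lemma frOf_len (g : List Int) : (frOf g).length ≤ 64 := by
  unfold frOf
  have h := List.length_filter_le (fun c => !(PySem.Set.contains (PySem.Set.ofList g) c)) (PySem.List.pyRange 0 64 1)
  have h2 : (PySem.List.pyRange 0 64 1).length = 64 := by
    rw [PySem.List.length_pyRange_one]; rfl
  omega

lemma Rr_mem {fr : List Int} {x y : Int} (hx : x ∈ fr) (h : Rr fr x y) : y ∈ fr := by
  induction h with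
  | refl => exact hx
  | tail _ e ih => exact e.1

lemma Rr_symm {fr : List Int} (hb : ∀ x ∈ fr, 0 ≤ x ∧ x < 64) {x y : Int}
    (hx : x ∈ fr) (h : Rr fr x y) : Rr fr y x := by
  induction h with
  | refl => exact Relation.ReflTransGen.refl
  | @tail b c hab e ih =>
      have hbfr : b ∈ fr := Rr_mem hx hab
      have hbb := hb b hbfr
      have : Estep fr c b := ⟨hbfr, nbrs_symm hbb.1 hbb.2 e.2⟩
      exact Relation.ReflTransGen.head this ih

lemma Rr_trans {fr : List Int} {x y z : Int} (h1 : Rr fr x y) (h2 : Rr fr y z) : Rr fr x z :=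
  Relation.ReflTransGen.trans h1 h2
-- ===== BFS characterization =====
def ClosedAt (fr V : List Int) (x : Int) : Prop :=
  ∀ y ∈ get_4neighbors x, y ∈ fr → y ∈ V

lemma bfs_fold (fr : List Int) (s cell : Int) (hc : Rr fr s cell) :
    ∀ (L : List Int) (V : PySem.Set Int) (Q : List Int)
      (F : PySem.Set Int × List Int),
      F = L.foldl
        (fun (st : PySem.Set Int × List Int) nb =>
          if PySem.Set.contains fr nb && !(PySem.Set.contains st.1 nb) then
            (PySem.Set.add st.1 nb, st.2 ++ [nb])
          else st) (V, Q) →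
      (∀ nb ∈ L, nb ∈ get_4neighbors cell) →
      V.Nodup → (∀ x ∈ Q, x ∈ V) → (∀ x ∈ V, Rr fr s x) → (∀ x ∈ V, x ∈ fr) →
      (F.1.Nodup ∧ (∀ x ∈ F.2, x ∈ F.1) ∧ (∀ x ∈ F.1, Rr fr s x) ∧ (∀ x ∈ F.1, x ∈ fr) ∧
       (∀ x ∈ V, x ∈ F.1) ∧ (∀ x ∈ Q, x ∈ F.2) ∧ (∀ x ∈ F.1, x ∈ V ∨ x ∈ F.2) ∧
       (∀ nb ∈ L, nb ∈ fr → nb ∈ F.1) ∧ F.1.length + Q.length = V.length + F.2.length) := by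
  intro L
  induction L with
  | nil =>
      intro V Q F hF _ hN hQ hR hS
      simp only [List.foldl_nil] at hF
      subst hF
      refine ⟨hN, hQ, hR, hS, fun x hx => hx, fun x hx => hx, fun x hx => Or.inl hx, ?_, rfl⟩
      intro nb hnb; exact absurd hnb List.not_mem_nil
  | cons nb L ih =>
      intro V Q F hF hL hN hQ hR hS
      simp only [List.foldl_cons] at hF
      by_cases hcond : (PySem.Set.contains fr nb && !(PySem.Set.contains V nb)) = true
      · rw [if_pos hcond] at hF
        simp only [Bool.and_eq_true, Bool.not_eq_true', PySem.Set.contains_eq_listContains,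
          List.contains_eq_mem, decide_eq_true_eq, decide_eq_false_iff_not] at hcond
        obtain ⟨hnbfr, hnbV⟩ := hcond
        have hnbmem : nb ∈ get_4neighbors cell := hL nb (by simp)
        have hRnb : Rr fr s nb := Relation.ReflTransGen.tail hc ⟨hnbfr, hnbmem⟩
        have hadd : PySem.Set.add V nb = V ++ [nb] := PySem.Set.add_of_not_mem hnbV
        have key := ih (PySem.Set.add V nb) (Q ++ [nb]) F hF
          (fun y hy => hL y (by simp [hy]))
          (PySem.Set.nodup_add V nb hN)
          (by intro x hx
              simp only [List.mem_append, List.mem_singleton] at hx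
              rcases hx with hx | hx
              · exact (PySem.Set.mem_add _ _ _).2 (Or.inl (hQ x hx))
              · exact (PySem.Set.mem_add _ _ _).2 (Or.inr hx))
          (by intro x hx
              rcases (PySem.Set.mem_add _ _ _).1 hx with hx | hx
              · exact hR x hx
              · exact hx ▸ hRnb)
          (by intro x hx
              rcases (PySem.Set.mem_add _ _ _).1 hx with hx | hx
              · exact hS x hx
              · exact hx ▸ hnbfr)
        obtain ⟨k1, k2, k3, k4, k5, k6, k7, k8, k9⟩ := key
        refine ⟨k1, k2, k3, k4, ?_, ?_, ?_, ?_, ?_⟩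
        · intro x hx; exact k5 x ((PySem.Set.mem_add _ _ _).2 (Or.inl hx))
        · intro x hx; exact k6 x (by simp [hx])
        · intro x hx
          rcases k7 x hx with hx' | hx'
          · rcases (PySem.Set.mem_add _ _ _).1 hx' with h | h
            · exact Or.inl h
            · exact Or.inr (k6 x (by simp [h]))
          · exact Or.inr hx'
        · intro y hy hyfr
          simp only [List.mem_cons] at hy
          rcases hy with rfl | hy
          · exact k5 y ((PySem.Set.mem_add _ _ _).2 (Or.inr rfl))
          · exact k8 y hy hyfr
        · rw [hadd] at k9
          simp only [List.length_append, List.length_singleton] at k9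
          omega
      · rw [if_neg hcond] at hF
        have key := ih V Q F hF (fun y hy => hL y (by simp [hy])) hN hQ hR hS
        obtain ⟨k1, k2, k3, k4, k5, k6, k7, k8, k9⟩ := key
        refine ⟨k1, k2, k3, k4, k5, k6, k7, ?_, k9⟩
        intro y hy hyfr
        simp only [List.mem_cons] at hy
        rcases hy with rfl | hy
        · simp only [Bool.and_eq_true, Bool.not_eq_true', PySem.Set.contains_eq_listContains,
            List.contains_eq_mem, decide_eq_true_eq, decide_eq_false_iff_not, not_and] at hcond
          have : y ∈ V := by
            by_contra hne
            simp [hyfr, hne] at hcond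
          exact k5 y this
        · exact k8 y hy hyfr
lemma floodLoop_spec (fr : List Int) (hb : ∀ x ∈ fr, 0 ≤ x ∧ x < 64) (hfrN : fr.Nodup)
    (s : Int) :
    ∀ (fuel : Nat) (V : PySem.Set Int) (Q : List Int),
      V.Nodup → (∀ x ∈ Q, x ∈ V) → (∀ x ∈ V, Rr fr s x) → (∀ x ∈ V, x ∈ fr) →
      (∀ x ∈ V, x ∈ Q ∨ ClosedAt fr V x) →
      2 * (fr.length - V.length) + Q.length ≤ fuel →
      (let W := floodLoop fr fuel V Q
       (∀ x ∈ V, x ∈ W) ∧ W.Nodup ∧ (∀ x ∈ W, Rr fr s x) ∧ (∀ x ∈ W, x ∈ fr) ∧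
       (∀ x ∈ W, ClosedAt fr W x)) := by
  intro fuel
  induction fuel with
  | zero =>
      intro V Q hN hQ hR hS hCl hfuel
      have hQnil : Q = [] := by
        cases Q with
        | nil => rfl
        | cons a t => simp at hfuel
      subst hQnil
      refine ⟨fun x hx => hx, hN, hR, hS, ?_⟩
      intro x hx
      rcases hCl x hx with h | h
      · exact absurd h List.not_mem_nil
      · exact h
  | succ fuel ih =>
      intro V Q hN hQ hR hS hCl hfuel
      cases Q with
      | nil =>
          refine ⟨fun x hx => hx, hN, hR, hS, ?_⟩
          intro x hx
          rcases hCl x hx with h | h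
          · exact absurd h List.not_mem_nil
          · exact h
      | cons cell rest =>
          have hcellV : cell ∈ V := hQ cell (by simp)
          have hcR : Rr fr s cell := hR cell hcellV
          obtain ⟨k1, k2, k3, k4, k5, k6, k7, k8, k9⟩ :=
            bfs_fold fr s cell hcR (get_4neighbors cell) V rest _ rfl
              (fun y hy => hy) hN (fun x hx => hQ x (by simp [hx])) hR hS
          simp only [floodLoop]
          set F := (get_4neighbors cell).foldl
            (fun (st : PySem.Set Int × List Int) nb =>
              if PySem.Set.contains fr nb && !(PySem.Set.contains st.1 nb) then
                (PySem.Set.add st.1 nb, st.2 ++ [nb])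
              else st) (V, rest) with hFdef
          -- length bounds
          have hVsub : V.length ≤ fr.length := ((hN.subperm (fun x hx => hS x hx)).length_le)
          have hF1sub : F.1.length ≤ fr.length := ((k1.subperm (fun x hx => k4 x hx)).length_le)
          have hVF1 : V.length ≤ F.1.length := ((hN.subperm (fun x hx => k5 x hx)).length_le)
          have hfuel' : 2 * (fr.length - F.1.length) + F.2.length ≤ fuel := by
            simp only [List.length_cons] at hfuel
            omega
          have key := ih F.1 F.2 k1 k2 k3 k4 ?_ hfuel'
          · obtain ⟨m1, m2, m3, m4, m5⟩ := key
            refine ⟨fun x hx => m1 x (k5 x hx), m2, m3, m4, m5⟩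
          · -- closedness invariant for the new state
            intro x hx
            rcases k7 x hx with hxV | hxQ
            · rcases hCl x hxV with hxq | hxcl
              · simp only [List.mem_cons] at hxq
                rcases hxq with rfl | hxq
                · -- x = cell: now closed by the fold
                  right
                  intro y hy hyfr
                  exact k8 y hy hyfr
                · left; exact k6 x hxq
              · right
                intro y hy hyfr
                exact k5 y (hxcl y hy hyfr)
            · left; exact hxQ
def classOf (fr : List Int) (s : Int) : List Int := flood_fill_count fr s

lemma classOf_spec (fr : List Int) (hb : ∀ x ∈ fr, 0 ≤ x ∧ x < 64) (hfrN : fr.Nodup)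
    (hlen : fr.length ≤ 64) {s : Int} (hs : s ∈ fr) :
    (classOf fr s).Nodup ∧ (∀ x, x ∈ classOf fr s ↔ Rr fr s x) := by
  have hinit : PySem.Set.add PySem.Set.empty s = [s] := rfl
  have key := floodLoop_spec fr hb hfrN s 200 [s] [s]
    (by simp) (by simp) (by intro x hx; simp at hx; subst hx; exact Relation.ReflTransGen.refl)
    (by intro x hx; simp at hx; subst hx; exact hs)
    (by intro x hx; left; exact hx)
    (by simp only [List.length_singleton]; omega)
  obtain ⟨m1, m2, m3, m4, m5⟩ := key
  have hW : classOf fr s = floodLoop fr 200 [s] [s] := by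
    simp only [classOf, flood_fill_count, hinit]
  rw [hW]
  refine ⟨m2, ?_⟩
  intro x
  constructor
  · exact m3 x
  · intro hR
    have hsW : s ∈ floodLoop fr 200 [s] [s] := m1 s (by simp)
    induction hR with
    | refl => exact hsW
    | @tail b c hab e ihh =>
        exact m5 b (ihh) c e.2 e.1
-- ===== A's outer loop =====
def badA (fr : List Int) (c : Int) : Bool :=
  !(PLAYER_PIECE_SIZES.contains (PySem.List.len (classOf fr c)))

def reps (fr : List Int) (l : List Int) : List Int :=
  l.foldl (fun acc c => if acc.any (fun p => decide (c ∈ classOf fr p)) then acc else acc ++ [c]) []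

lemma reps_append (fr l : List Int) (c : Int) :
    reps fr (l ++ [c]) =
      if (reps fr l).any (fun p => decide (c ∈ classOf fr p)) then reps fr l
      else reps fr l ++ [c] := by
  simp only [reps, List.foldl_append, List.foldl_cons, List.foldl_nil]

lemma reps_sub (fr : List Int) : ∀ l, reps fr l ⊆ l := by
  intro l
  induction l using List.reverseRecOn with
  | nil => simp [reps]
  | append_singleton l c ih =>
      rw [reps_append]
      split_ifs with h
      · exact fun x hx => List.mem_append_left _ (ih hx)
      · intro x hx
        rcases List.mem_append.1 hx with hx | hx
        · exact List.mem_append_left _ (ih hx)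
        · exact List.mem_append_right _ hx

lemma reps_complete (fr : List Int) (hb : ∀ x ∈ fr, 0 ≤ x ∧ x < 64) (hfrN : fr.Nodup)
    (hlen : fr.length ≤ 64) :
    ∀ l, l ⊆ fr → ∀ p ∈ l, ∃ r ∈ reps fr l, Rr fr r p := by
  intro l
  induction l using List.reverseRecOn with
  | nil => intro _ p hp; exact absurd hp List.not_mem_nil
  | append_singleton l c ih =>
      intro hsub p hp
      have hlsub : l ⊆ fr := fun x hx => hsub (List.mem_append_left _ hx)
      have hcfr : c ∈ fr := hsub (List.mem_append_right _ (by simp))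
      rw [reps_append]
      split_ifs with h
      · rcases List.mem_append.1 hp with hp | hp
        · exact ih hlsub p hp
        · simp only [List.mem_singleton] at hp; subst hp
          simp only [List.any_eq_true, decide_eq_true_eq] at h
          obtain ⟨r, hr, hmem⟩ := h
          have hrfr : r ∈ fr := hlsub (reps_sub fr l hr)
          exact ⟨r, hr, ((classOf_spec fr hb hfrN hlen hrfr).2 p).1 hmem⟩
      · rcases List.mem_append.1 hp with hp | hp
        · obtain ⟨r, hr, hR⟩ := ih hlsub p hp
          exact ⟨r, List.mem_append_left _ hr, hR⟩
        · simp only [List.mem_singleton] at hp; subst hp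
          exact ⟨p, List.mem_append_right _ (by simp), Relation.ReflTransGen.refl⟩

lemma reps_pairwise (fr : List Int) (hb : ∀ x ∈ fr, 0 ≤ x ∧ x < 64) (hfrN : fr.Nodup)
    (hlen : fr.length ≤ 64) :
    ∀ l, l ⊆ fr → (reps fr l).Pairwise (fun a b => ¬ Rr fr a b) := by
  intro l
  induction l using List.reverseRecOn with
  | nil => simp [reps]
  | append_singleton l c ih =>
      intro hsub
      have hlsub : l ⊆ fr := fun x hx => hsub (List.mem_append_left _ hx)
      have hcfr : c ∈ fr := hsub (List.mem_append_right _ (by simp))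
      rw [reps_append]
      split_ifs with h
      · exact ih hlsub
      · rw [List.pairwise_append]
        refine ⟨ih hlsub, by simp, ?_⟩
        intro a ha b hb'
        simp only [List.mem_singleton] at hb'; subst hb'
        simp only [List.any_eq_true, decide_eq_true_eq, not_exists, not_and] at h
        have hafr : a ∈ fr := hlsub (reps_sub fr l ha)
        intro hR
        exact h a ha (((classOf_spec fr hb hfrN hlen hafr).2 b).2 hR)
lemma aloop_spec (fr : List Int) (hb : ∀ x ∈ fr, 0 ≤ x ∧ x < 64) (hfrN : fr.Nodup)
    (hlen : fr.length ≤ 64) :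
    ∀ l, l ⊆ fr →
      (let st := l.foldl
        (fun (st : PySem.Set Int × Int) cell =>
          if PySem.Set.contains st.1 cell then st
          else
            let region := flood_fill_count fr cell
            (PySem.Set.union st.1 region,
             if !(PLAYER_PIECE_SIZES.contains (PySem.List.len region)) then st.2 + 1 else st.2))
        (PySem.Set.empty, 0)
       (∀ x, x ∈ st.1 ↔ ∃ p ∈ l, Rr fr p x) ∧ st.1.Nodup ∧
         st.2 = ((reps fr l).countP (badA fr) : Int)) := by
  intro l
  induction l using List.reverseRecOn with
  | nil =>
      simp [reps, PySem.Set.empty]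
  | append_singleton l c ih =>
      intro hsub
      have hlsub : l ⊆ fr := fun x hx => hsub (List.mem_append_left _ hx)
      have hcfr : c ∈ fr := hsub (List.mem_append_right _ (by simp))
      obtain ⟨ih1, ihN, ih2⟩ := ih hlsub
      simp only [List.foldl_append, List.foldl_cons, List.foldl_nil]
      set st := l.foldl
        (fun (st : PySem.Set Int × Int) cell =>
          if PySem.Set.contains st.1 cell then st
          else
            let region := flood_fill_count fr cell
            (PySem.Set.union st.1 region,
             if !(PLAYER_PIECE_SIZES.contains (PySem.List.len region)) then st.2 + 1 else st.2))
        (PySem.Set.empty, 0) with hst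
      have hcls := classOf_spec fr hb hfrN hlen hcfr
      by_cases hc : c ∈ st.1
      · -- already visited
        have hcond : PySem.Set.contains st.1 c = true := by
          simp [PySem.Set.contains_eq_listContains, List.contains_eq_mem, hc]
        rw [if_pos hcond]
        have hex : ∃ p ∈ l, Rr fr p c := (ih1 c).1 hc
        have hany : (reps fr l).any (fun p => decide (c ∈ classOf fr p)) = true := by
          obtain ⟨p, hp, hRp⟩ := hex
          obtain ⟨r, hr, hRr⟩ := reps_complete fr hb hfrN hlen l hlsub p hp
          have hrfr : r ∈ fr := hlsub (reps_sub fr l hr)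
          have : c ∈ classOf fr r :=
            ((classOf_spec fr hb hfrN hlen hrfr).2 c).2 (Rr_trans hRr hRp)
          simp only [List.any_eq_true, decide_eq_true_eq]
          exact ⟨r, hr, this⟩
        rw [reps_append, if_pos hany]
        refine ⟨?_, ihN, ih2⟩
        intro x
        rw [ih1 x]
        constructor
        · rintro ⟨p, hp, hR⟩
          exact ⟨p, List.mem_append_left _ hp, hR⟩
        · rintro ⟨p, hp, hR⟩
          rcases List.mem_append.1 hp with hp | hp
          · exact ⟨p, hp, hR⟩
          · simp only [List.mem_singleton] at hp; subst hp
            obtain ⟨q, hq, hRq⟩ := hex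
            exact ⟨q, hq, Rr_trans hRq hR⟩
      · -- new region
        have hcond : PySem.Set.contains st.1 c = false := by
          simp [PySem.Set.contains_eq_listContains, List.contains_eq_mem, hc]
        rw [hcond]
        simp only [Bool.false_eq_true, if_false]
        have hany : (reps fr l).any (fun p => decide (c ∈ classOf fr p)) = false := by
          rw [Bool.eq_false_iff]
          intro hx
          simp only [List.any_eq_true, decide_eq_true_eq] at hx
          obtain ⟨r, hr, hmem⟩ := hx
          have hrfr : r ∈ fr := hlsub (reps_sub fr l hr)
          have hR : Rr fr r c := ((classOf_spec fr hb hfrN hlen hrfr).2 c).1 hmem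
          exact hc ((ih1 c).2 ⟨r, reps_sub fr l hr, hR⟩)
        rw [reps_append, hany]
        simp only [Bool.false_eq_true, if_false]
        refine ⟨?_, PySem.Set.nodup_union _ _ ihN, ?_⟩
        · intro x
          rw [PySem.Set.mem_union, ih1 x]
          constructor
          · rintro (⟨p, hp, hR⟩ | hx)
            · exact ⟨p, List.mem_append_left _ hp, hR⟩
            · exact ⟨c, List.mem_append_right _ (by simp), ((hcls.2 x).1 hx)⟩
          · rintro ⟨p, hp, hR⟩
            rcases List.mem_append.1 hp with hp | hp
            · exact Or.inl ⟨p, hp, hR⟩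
            · simp only [List.mem_singleton] at hp; subst hp
              exact Or.inr ((hcls.2 x).2 hR)
        · dsimp only
          have hcount : (reps fr l ++ [c]).countP (badA fr)
              = (reps fr l).countP (badA fr) + if badA fr c then 1 else 0 := by
            rw [List.countP_append]
            simp [List.countP_cons]
          rw [hcount]
          rw [show (!(PLAYER_PIECE_SIZES.contains (PySem.List.len (flood_fill_count fr c)))) = badA fr c from rfl]
          by_cases hbad : badA fr c = true
          · simp [hbad, ih2]
          · simp only [Bool.not_eq_true] at hbad
            simp [hbad, ih2]
lemma A_char (g : List Int) :
    compute_pocket_score g = ((reps (frOf g) (frOf g)).countP (badA (frOf g)) : Int) := by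
  have hfree : PySem.Set.diff (PySem.Set.ofList (PySem.List.pyRange 0 64 1)) (PySem.Set.ofList g)
      = frOf g := by
    rw [PySem.Set.ofList_eq_self_of_nodup _ (PySem.List.nodup_pyRange_one 0 64)]
    rfl
  simp only [compute_pocket_score]
  rw [hfree]
  exact (aloop_spec (frOf g) (frOf_bound g) (frOf_nodup g) (frOf_len g) (frOf g)
    (fun x hx => hx)).2.2

-- ===== B: union-find =====
def GoodP (fr : List Int) (p : PySem.Dict Int Int) : Prop :=
  (∀ x ∈ fr, (p.get? x).isSome) ∧
  (∀ x v, p.get? x = some v → x ∈ fr ∧ v ∈ fr ∧ x ≤ v ∧ Rr fr x v)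

lemma find_fix (p : PySem.Dict Int Int) : ∀ (fuel : Nat) (r : Int),
    p.getD r r = r → find_root p fuel r = r := by
  intro fuel
  induction fuel with
  | zero => intro r _; rfl
  | succ fuel ih =>
      intro r h
      simp only [find_root, h]
      simp

lemma find_aux (fr : List Int) (hb : ∀ x ∈ fr, 0 ≤ x ∧ x < 64)
    (p : PySem.Dict Int Int) (hp : GoodP fr p) :
    ∀ (fuel : Nat) (x : Int), x ∈ fr → 64 ≤ fuel + x.toNat →
      (find_root p fuel x ∈ fr ∧ Rr fr x (find_root p fuel x) ∧
       p.getD (find_root p fuel x) (find_root p fuel x) = find_root p fuel x) := by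
  intro fuel
  induction fuel with
  | zero =>
      intro x hx hf
      have := hb x hx
      omega
  | succ fuel ih =>
      intro x hx hf
      obtain ⟨v, hv⟩ := Option.isSome_iff_exists.1 (hp.1 x hx)
      have hgd : p.getD x x = v := by
        rw [PySem.Dict.getD_eq_get?_getD, hv]; rfl
      obtain ⟨_, hvfr, hxv, hRxv⟩ := hp.2 x v hv
      by_cases hvx : v = x
      · subst hvx
        simp only [find_root, hgd]
        simp only [ne_eq, not_true_eq_false, if_false, ite_self]
        exact ⟨hx, Relation.ReflTransGen.refl, hgd⟩
      · have hxlt : x < v := lt_of_le_of_ne hxv (fun h => hvx h.symm)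
        have hb' := hb x hx
        have hbv := hb v hvfr
        have hf' : 64 ≤ fuel + v.toNat := by omega
        obtain ⟨m1, m2, m3⟩ := ih v hvfr hf'
        simp only [find_root, hgd]
        rw [if_pos (by exact hvx)]
        exact ⟨m1, Rr_trans hRxv m2, m3⟩

lemma find_reroot (fr : List Int) (hb : ∀ x ∈ fr, 0 ≤ x ∧ x < 64)
    (p : PySem.Dict Int Int) (hp : GoodP fr p) (ra rb : Int)
    (hra : ra ∈ fr) (hrb : rb ∈ fr)
    (hfa : p.getD ra ra = ra) (hfb : p.getD rb rb = rb) (hne : ra ≠ rb) :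
    ∀ (fuel : Nat) (x : Int), x ∈ fr → 64 ≤ fuel + x.toNat →
      find_root (p.insert ra rb) fuel x =
        (if find_root p fuel x = ra then rb else find_root p fuel x) := by
  intro fuel
  induction fuel with
  | zero =>
      intro x hx hf
      have := hb x hx
      omega
  | succ fuel ih =>
      intro x hx hf
      by_cases hxa : x = ra
      · have h1 : (p.insert ra rb).getD x x = rb := by
          rw [hxa]; exact PySem.Dict.getD_insert_self _ _ _ _
        have h2 : (p.insert ra rb).getD rb rb = rb := by
          rw [PySem.Dict.getD_insert_of_ne]
          · exact hfb
          · exact Ne.symm hne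
        have hfx : p.getD x x = x := by rw [hxa]; exact hxa ▸ hfa
        have hL : find_root (p.insert ra rb) (fuel + 1) x = rb := by
          simp only [find_root, h1]
          rw [if_pos (by rw [hxa]; exact Ne.symm hne)]
          exact find_fix _ fuel rb h2
        have hR : find_root p (fuel + 1) x = x := by
          simp only [find_root, hfx]
          simp
        rw [hL, hR, if_pos hxa]
      · have h1 : (p.insert ra rb).getD x x = p.getD x x :=
          PySem.Dict.getD_insert_of_ne _ _ _ hxa
        obtain ⟨v, hv⟩ := Option.isSome_iff_exists.1 (hp.1 x hx)
        have hgd : p.getD x x = v := by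
          rw [PySem.Dict.getD_eq_get?_getD, hv]; rfl
        obtain ⟨_, hvfr, hxv, _⟩ := hp.2 x v hv
        by_cases hvx : v = x
        · have hL : find_root (p.insert ra rb) (fuel + 1) x = x := by
            simp only [find_root, h1, hgd, hvx]
            simp
          have hR : find_root p (fuel + 1) x = x := by
            simp only [find_root, hgd, hvx]
            simp
          rw [hL, hR, if_neg hxa]
        · have hb' := hb x hx
          have hbv := hb v hvfr
          have hf' : 64 ≤ fuel + v.toNat := by
            have : x < v := lt_of_le_of_ne hxv (fun h => hvx h.symm)
            omega
          have hL : find_root (p.insert ra rb) (fuel + 1) x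
              = find_root (p.insert ra rb) fuel v := by
            simp only [find_root, h1, hgd]
            rw [if_pos hvx]
          have hR : find_root p (fuel + 1) x = find_root p fuel v := by
            simp only [find_root, hgd]
            rw [if_pos hvx]
          rw [hL, hR]
          exact ih v hvfr hf'
def rootp (p : PySem.Dict Int Int) (x : Int) : Int := find_root p 64 x

lemma rootp_spec (fr : List Int) (hb : ∀ x ∈ fr, 0 ≤ x ∧ x < 64)
    (p : PySem.Dict Int Int) (hp : GoodP fr p) {x : Int} (hx : x ∈ fr) :
    rootp p x ∈ fr ∧ Rr fr x (rootp p x) ∧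
      p.getD (rootp p x) (rootp p x) = rootp p x :=
  find_aux fr hb p hp 64 x hx (by have := hb x hx; omega)

lemma rootp_reroot (fr : List Int) (hb : ∀ x ∈ fr, 0 ≤ x ∧ x < 64)
    (p : PySem.Dict Int Int) (hp : GoodP fr p) {ra rb : Int}
    (hra : ra ∈ fr) (hrb : rb ∈ fr)
    (hfa : p.getD ra ra = ra) (hfb : p.getD rb rb = rb) (hne : ra ≠ rb)
    {x : Int} (hx : x ∈ fr) :
    rootp (p.insert ra rb) x = (if rootp p x = ra then rb else rootp p x) :=
  find_reroot fr hb p hp ra rb hra hrb hfa hfb hne 64 x hx (by have := hb x hx; omega)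

lemma GoodP_insert (fr : List Int) (p : PySem.Dict Int Int) (hp : GoodP fr p)
    {ra rb : Int} (hra : ra ∈ fr) (hrb : rb ∈ fr) (hle : ra ≤ rb) (hR : Rr fr ra rb) :
    GoodP fr (p.insert ra rb) := by
  constructor
  · intro x hx
    by_cases hxa : x = ra
    · rw [hxa, PySem.Dict.get?_insert_self]; rfl
    · rw [PySem.Dict.get?_insert_of_ne _ _ hxa]
      exact hp.1 x hx
  · intro x v hv
    by_cases hxa : x = ra
    · rw [hxa, PySem.Dict.get?_insert_self] at hv
      obtain rfl : rb = v := by injection hv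
      exact ⟨hxa ▸ hra, hrb, hxa ▸ hle, hxa ▸ hR⟩
    · rw [PySem.Dict.get?_insert_of_ne _ _ hxa] at hv
      exact hp.2 x v hv

lemma union_spec (fr : List Int) (hb : ∀ x ∈ fr, 0 ≤ x ∧ x < 64)
    (p : PySem.Dict Int Int) (hp : GoodP fr p) (a b : Int)
    (ha : a ∈ fr) (hbm : b ∈ fr) (hRab : Rr fr a b) :
    GoodP fr (uf_union p a b) ∧ rootp (uf_union p a b) a = rootp (uf_union p a b) b ∧
      (∀ x y, x ∈ fr → y ∈ fr → rootp p x = rootp p y →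
        rootp (uf_union p a b) x = rootp (uf_union p a b) y) := by
  obtain ⟨hafr, hRa, hfixa⟩ := rootp_spec fr hb p hp ha
  obtain ⟨hbfr, hRb, hfixb⟩ := rootp_spec fr hb p hp hbm
  have hàb : Rr fr (rootp p a) (rootp p b) :=
    Rr_trans (Rr_symm hb ha hRa) (Rr_trans hRab hRb)
  have hrbra : Rr fr (rootp p b) (rootp p a) := Rr_symm hb hafr hàb
  have hrr : ∀ c : Int, find_root p 64 c = rootp p c := fun _ => rfl
  by_cases heq : rootp p a = rootp p b
  · have hu : uf_union p a b = p := by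
      simp only [uf_union]
      rw [hrr, hrr, if_neg (by simp [heq])]
    rw [hu]
    exact ⟨hp, heq, fun x y _ _ h => h⟩
  · by_cases hlt : rootp p a < rootp p b
    · have hu : uf_union p a b = p.insert (rootp p a) (rootp p b) := by
        simp only [uf_union]
        rw [hrr, hrr, if_pos (by exact heq), if_pos hlt]
      rw [hu]
      have hG := GoodP_insert fr p hp hafr hbfr (le_of_lt hlt) hàb
      have hF : ∀ x, x ∈ fr →
          rootp (p.insert (rootp p a) (rootp p b)) x =
            (if rootp p x = rootp p a then rootp p b else rootp p x) :=
        fun x hx => rootp_reroot fr hb p hp hafr hbfr hfixa hfixb heq hx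
      refine ⟨hG, ?_, ?_⟩
      · rw [hF a ha, hF b hbm, if_pos rfl, if_neg (Ne.symm heq)]
      · intro x y hx hy h
        rw [hF x hx, hF y hy, h]
    · have hlt' : rootp p b < rootp p a := by
        rcases lt_trichotomy (rootp p a) (rootp p b) with h | h | h
        · exact absurd h hlt
        · exact absurd h heq
        · exact h
      have hu : uf_union p a b = p.insert (rootp p b) (rootp p a) := by
        simp only [uf_union]
        rw [hrr, hrr, if_pos (by exact heq), if_neg hlt]
      rw [hu]
      have hG := GoodP_insert fr p hp hbfr hafr (le_of_lt hlt') hrbra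
      have hF : ∀ x, x ∈ fr →
          rootp (p.insert (rootp p b) (rootp p a)) x =
            (if rootp p x = rootp p b then rootp p a else rootp p x) :=
        fun x hx => rootp_reroot fr hb p hp hbfr hafr hfixb hfixa (Ne.symm heq) hx
      refine ⟨hG, ?_, ?_⟩
      · rw [hF a ha, hF b hbm, if_pos rfl, if_neg heq]
      · intro x y hx hy h
        rw [hF x hx, hF y hy, h]
def EdgesDone (fr l : List Int) (p : PySem.Dict Int Int) : Prop :=
  ∀ c ∈ l, (c % 8 < 7 → (c + 1) ∈ fr → rootp p c = rootp p (c + 1)) ∧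
           (c < 56 → (c + 8) ∈ fr → rootp p c = rootp p (c + 8))

lemma uloop_spec (fr : List Int) (hb : ∀ x ∈ fr, 0 ≤ x ∧ x < 64) :
    ∀ (l : List Int), l ⊆ fr → ∀ (p : PySem.Dict Int Int), GoodP fr p →
      (let q := l.foldl
        (fun d c =>
          let d1 := if PySem.Int.mod c 8 < 7 && PySem.Set.contains fr (c + 1) then uf_union d c (c + 1) else d
          if PySem.Int.floordiv c 8 < 7 && PySem.Set.contains fr (c + 8) then uf_union d1 c (c + 8) else d1)
        p
       GoodP fr q ∧ EdgesDone fr l q ∧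
         (∀ x y, x ∈ fr → y ∈ fr → rootp p x = rootp p y → rootp q x = rootp q y)) := by
  intro l
  induction l with
  | nil =>
      intro _ p hp
      exact ⟨hp, fun c hc => absurd hc List.not_mem_nil, fun x y _ _ h => h⟩
  | cons c l ih =>
      intro hsub p hp
      have hc : c ∈ fr := hsub (by simp)
      have hcb := hb c hc
      have hlsub : l ⊆ fr := fun x hx => hsub (by simp [hx])
      have h8 : (0:Int) < 8 := by norm_num
      simp only [List.foldl_cons]
      set d1 := if PySem.Int.mod c 8 < 7 && PySem.Set.contains fr (c + 1) then uf_union p c (c + 1) else p with hd1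
      set d2 := if PySem.Int.floordiv c 8 < 7 && PySem.Set.contains fr (c + 8) then uf_union d1 c (c + 8) else d1 with hd2
      have hcond1 : (PySem.Int.mod c 8 < 7 && PySem.Set.contains fr (c + 1)) = true ↔
          (c % 8 < 7 ∧ (c + 1) ∈ fr) := by
        simp [PySem.Int.mod_eq_emod_of_pos h8, PySem.Set.contains_eq_listContains,
          List.contains_eq_mem]
      have hcond2 : (PySem.Int.floordiv c 8 < 7 && PySem.Set.contains fr (c + 8)) = true ↔
          (c < 56 ∧ (c + 8) ∈ fr) := by
        simp only [PySem.Int.floordiv_eq_ediv_of_pos h8, PySem.Set.contains_eq_listContains,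
          List.contains_eq_mem, Bool.and_eq_true, decide_eq_true_eq]
        constructor
        · rintro ⟨h1, h2⟩; exact ⟨by omega, h2⟩
        · rintro ⟨h1, h2⟩; exact ⟨by omega, h2⟩
      -- step 1
      have step1 : GoodP fr d1 ∧
          (c % 8 < 7 → (c + 1) ∈ fr → rootp d1 c = rootp d1 (c + 1)) ∧
          (∀ x y, x ∈ fr → y ∈ fr → rootp p x = rootp p y → rootp d1 x = rootp d1 y) := by
        by_cases h : (PySem.Int.mod c 8 < 7 && PySem.Set.contains fr (c + 1)) = true
        · obtain ⟨hm, hmem⟩ := hcond1.1 h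
          have hR : Rr fr c (c + 1) := Relation.ReflTransGen.single
            ⟨hmem, (mem_nbrs_iff c (c + 1) hcb.1 hcb.2).2 (by omega)⟩
          obtain ⟨g1, g2, g3⟩ := union_spec fr hb p hp c (c + 1) hc hmem hR
          rw [hd1, if_pos h]
          exact ⟨g1, fun _ _ => g2, g3⟩
        · rw [hd1, if_neg h]
          exact ⟨hp, fun hm hmem => absurd (hcond1.2 ⟨hm, hmem⟩) h, fun x y _ _ hh => hh⟩
      obtain ⟨G1, E1, P1⟩ := step1
      -- step 2
      have step2 : GoodP fr d2 ∧
          (c < 56 → (c + 8) ∈ fr → rootp d2 c = rootp d2 (c + 8)) ∧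
          (∀ x y, x ∈ fr → y ∈ fr → rootp d1 x = rootp d1 y → rootp d2 x = rootp d2 y) := by
        by_cases h : (PySem.Int.floordiv c 8 < 7 && PySem.Set.contains fr (c + 8)) = true
        · obtain ⟨hm, hmem⟩ := hcond2.1 h
          have hR : Rr fr c (c + 8) := Relation.ReflTransGen.single
            ⟨hmem, (mem_nbrs_iff c (c + 8) hcb.1 hcb.2).2 (by omega)⟩
          obtain ⟨g1, g2, g3⟩ := union_spec fr hb d1 G1 c (c + 8) hc hmem hR
          rw [hd2, if_pos h]
          exact ⟨g1, fun _ _ => g2, g3⟩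
        · rw [hd2, if_neg h]
          exact ⟨G1, fun hm hmem => absurd (hcond2.2 ⟨hm, hmem⟩) h, fun x y _ _ hh => hh⟩
      obtain ⟨G2, E2, P2⟩ := step2
      obtain ⟨Gq, Eq', Pq⟩ := ih hlsub d2 G2
      refine ⟨Gq, ?_, ?_⟩
      · intro e he
        rcases List.mem_cons.1 he with rfl | he
        · constructor
          · intro hm hmem
            exact Pq e (e + 1) hc hmem (P2 e (e + 1) hc hmem (E1 hm hmem))
          · intro hm hmem
            exact Pq e (e + 8) hc hmem (E2 hm hmem)
        · exact Eq' e he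
      · intro x y hx hy h
        exact Pq x y hx hy (P2 x y hx hy (P1 x y hx hy h))
lemma parent0_get? : ∀ (l : List Int) (d : PySem.Dict Int Int) (x : Int),
    (l.foldl (fun d c => d.insert c c) d).get? x = if x ∈ l then some x else d.get? x := by
  intro l
  induction l with
  | nil => intro d x; simp
  | cons c l ih =>
      intro d x
      simp only [List.foldl_cons]
      rw [ih (d.insert c c) x]
      by_cases hxl : x ∈ l
      · rw [if_pos hxl, if_pos (by simp [hxl])]
      · rw [if_neg hxl]
        by_cases hxc : x = c
        · rw [hxc, PySem.Dict.get?_insert_self, if_pos (by simp)]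
        · rw [PySem.Dict.get?_insert_of_ne _ _ hxc, if_neg (by simp [hxl, hxc])]

lemma GoodP_init (fr : List Int) :
    GoodP fr (fr.foldl (fun d c => d.insert c c) PySem.Dict.empty) := by
  constructor
  · intro x hx
    rw [parent0_get? fr _ x, if_pos hx]
    rfl
  · intro x v hv
    rw [parent0_get? fr _ x] at hv
    by_cases hx : x ∈ fr
    · rw [if_pos hx] at hv
      obtain rfl : x = v := by injection hv
      exact ⟨hx, hx, le_refl x, Relation.ReflTransGen.refl⟩
    · rw [if_neg hx] at hv
      simp [PySem.Dict.get?_empty] at hv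

lemma root_const (fr : List Int) (hb : ∀ x ∈ fr, 0 ≤ x ∧ x < 64)
    (p : PySem.Dict Int Int) (hE : EdgesDone fr fr p)
    {x y : Int} (hx : x ∈ fr) (hR : Rr fr x y) : rootp p x = rootp p y := by
  induction hR with
  | refl => rfl
  | @tail u v huv e ih =>
      have hufr : u ∈ fr := Rr_mem hx huv
      have hub := hb u hufr
      have hvb := hb v e.1
      rw [ih]
      rcases (mem_nbrs_iff u v hub.1 hub.2).1 e.2 with ⟨h1, h2⟩ | ⟨h1, h2⟩ | ⟨h1, h2⟩ | ⟨h1, h2⟩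
      · -- v = u - 8: down edge from v
        have := (hE v e.1).2 (by omega) (by rw [show v + 8 = u by omega]; exact hufr)
        rw [show v + 8 = u by omega] at this
        exact this.symm
      · -- v = u + 8
        rw [h2]
        exact (hE u hufr).2 (by omega) (h2 ▸ e.1)
      · -- v = u - 1: right edge from v
        have := (hE v e.1).1 (by omega) (by rw [show v + 1 = u by omega]; exact hufr)
        rw [show v + 1 = u by omega] at this
        exact this.symm
      · -- v = u + 1
        rw [h2]
        exact (hE u hufr).1 (by omega) (h2 ▸ e.1)
def badL (n : Nat) : Bool := !(PLAYER_PIECE_SIZES.contains ((n : Nat) : Int))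

lemma countP_mem_eq_length {W fr : List Int} (hW : W.Nodup) (hfr : fr.Nodup)
    (hsub : ∀ x ∈ W, x ∈ fr) :
    fr.countP (fun c => decide (c ∈ W)) = W.length := by
  rw [List.countP_eq_length_filter]
  have h1 : (fr.filter (fun c => decide (c ∈ W))).Nodup := hfr.filter _
  have hperm : (fr.filter (fun c => decide (c ∈ W))).Perm W := by
    rw [List.perm_ext_iff_of_nodup h1 hW]
    intro a
    simp only [List.mem_filter, decide_eq_true_eq]
    exact ⟨fun h => h.2, fun h => ⟨hsub a h, h⟩⟩
  exact hperm.length_eq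

lemma A_eq_B (g : List Int) : compute_pocket_score g = compute_pocket_score_alt g := by
  have hb := frOf_bound g
  have hN := frOf_nodup g
  have hlen := frOf_len g
  have hset : PySem.Set.ofList (frOf g) = frOf g := PySem.Set.ofList_eq_self_of_nodup _ hN
  have halt : compute_pocket_score_alt g =
      (let parent := (frOf g).foldl
        (fun d c =>
          let d1 := if PySem.Int.mod c 8 < 7 && PySem.Set.contains (PySem.Set.ofList (frOf g)) (c + 1) then uf_union d c (c + 1) else d
          if PySem.Int.floordiv c 8 < 7 && PySem.Set.contains (PySem.Set.ofList (frOf g)) (c + 8) then uf_union d1 c (c + 8) else d1)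
        ((frOf g).foldl (fun d c => d.insert c c) PySem.Dict.empty)
       ((((frOf g).foldl
            (fun (d : PySem.Dict Int Int) c => d.insert (rootp parent c) (d.getD (rootp parent c) 0 + 1))
            PySem.Dict.empty).values.filter
          (fun s => !(PLAYER_PIECE_SIZES.contains s))).length : Int)) := rfl
  rw [A_char g, halt]
  simp only [hset]
  set pF := (frOf g).foldl
        (fun d c =>
          let d1 := if PySem.Int.mod c 8 < 7 && PySem.Set.contains (frOf g) (c + 1) then uf_union d c (c + 1) else d
          if PySem.Int.floordiv c 8 < 7 && PySem.Set.contains (frOf g) (c + 8) then uf_union d1 c (c + 8) else d1)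
        ((frOf g).foldl (fun d c => d.insert c c) PySem.Dict.empty) with hpF
  obtain ⟨GF, EF, -⟩ := uloop_spec (frOf g) hb (frOf g) (fun x hx => hx)
    ((frOf g).foldl (fun d c => d.insert c c) PySem.Dict.empty) (GoodP_init (frOf g))
  have f1 : ∀ c ∈ frOf g, rootp pF c ∈ frOf g ∧ Rr (frOf g) c (rootp pF c) :=
    fun c hc => ⟨(rootp_spec (frOf g) hb pF GF hc).1, (rootp_spec (frOf g) hb pF GF hc).2.1⟩
  have f2 : ∀ x y, x ∈ frOf g → Rr (frOf g) x y → rootp pF x = rootp pF y :=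
    fun x y hx hR => root_const (frOf g) hb pF EF hx hR
  have f3 : ∀ c ∈ frOf g, rootp pF (rootp pF c) = rootp pF c :=
    fun c hc => find_fix pF 64 _ (rootp_spec (frOf g) hb pF GF hc).2.2
  have hsz : (frOf g).foldl
      (fun (d : PySem.Dict Int Int) c => d.insert (rootp pF c) (d.getD (rootp pF c) 0 + 1))
      PySem.Dict.empty = PySem.Dict.counter ((frOf g).map (rootp pF)) := by
    rw [← PySem.Dict.foldl_insert_getD_add_one_eq_counter, List.foldl_map]
  rw [hsz]
  have hvals : (PySem.Dict.counter ((frOf g).map (rootp pF))).values =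
      (PySem.Set.ofList ((frOf g).map (rootp pF))).map
        (fun k => ((((frOf g).map (rootp pF)).count k : Nat) : Int)) := by
    simp only [PySem.Dict.values, PySem.Dict.items_counter, List.map_map]
    rfl
  rw [hvals, ← List.countP_eq_length_filter, List.countP_map]
  congr 1
  have hrsub : ∀ x ∈ reps (frOf g) (frOf g), x ∈ frOf g := fun x hx => reps_sub _ _ hx
  have hpw := reps_pairwise (frOf g) hb hN hlen (frOf g) (fun x hx => hx)
  have hcompl := reps_complete (frOf g) hb hN hlen (frOf g) (fun x hx => hx)
  have hinj : ∀ a ∈ frOf g, ∀ b ∈ frOf g, rootp pF a = rootp pF b → Rr (frOf g) a b := by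
    intro a ha b hb' h
    exact Rr_trans (h ▸ (f1 a ha).2) (Rr_symm hb hb' (f1 b hb').2)
  have hiff : ∀ c ∈ frOf g, ∀ k ∈ frOf g, rootp pF k = k →
      (rootp pF c = k ↔ Rr (frOf g) k c) := by
    intro c hc k hk hfix
    constructor
    · intro h
      exact Rr_symm hb hc (h ▸ (f1 c hc).2)
    · intro h
      rw [← hfix]
      exact (f2 k c hk h).symm
  have hsize : ∀ c ∈ frOf g,
      (classOf (frOf g) (rootp pF c)).length = (classOf (frOf g) c).length := by
    intro c hc
    have hrc := f1 c hc
    have hc1 := classOf_spec (frOf g) hb hN hlen hc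
    have hc2 := classOf_spec (frOf g) hb hN hlen hrc.1
    have hperm : (classOf (frOf g) (rootp pF c)).Perm (classOf (frOf g) c) := by
      rw [List.perm_ext_iff_of_nodup hc2.1 hc1.1]
      intro a
      rw [hc2.2 a, hc1.2 a]
      exact ⟨fun h => Rr_trans hrc.2 h, fun h => Rr_trans (Rr_symm hb hc hrc.2) h⟩
    exact hperm.length_eq
  have hbadA : ∀ c, badA (frOf g) c = badL (classOf (frOf g) c).length := by
    intro c
    simp [badA, badL, PySem.List.len_eq]
  -- step 1: push the count through the canonical map `rootp pF`
  have step1 : (reps (frOf g) (frOf g)).countP (badA (frOf g)) =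
      ((reps (frOf g) (frOf g)).map (rootp pF)).countP
        (fun k => badL (classOf (frOf g) k).length) := by
    rw [List.countP_map]
    apply List.countP_congr
    intro c hc
    have hcfr := hrsub c hc
    rw [hbadA c]
    simp only [Function.comp]
    rw [hsize c hcfr]
  -- step 2: the mapped reps are a permutation of the dedup'd image
  have hmapN : ((reps (frOf g) (frOf g)).map (rootp pF)).Nodup := by
    unfold List.Nodup
    rw [List.pairwise_map]
    refine hpw.imp_of_mem ?_
    intro a b ha hb' hnR heq
    exact hnR (hinj a (hrsub a ha) b (hrsub b hb') heq)
  have hperm2 : ((reps (frOf g) (frOf g)).map (rootp pF)).Perm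
      (PySem.Set.ofList ((frOf g).map (rootp pF))) := by
    rw [List.perm_ext_iff_of_nodup hmapN (PySem.Set.nodup_ofList _)]
    intro a
    rw [PySem.Set.mem_ofList]
    simp only [List.mem_map]
    constructor
    · rintro ⟨c, hc, rfl⟩
      exact ⟨c, hrsub c hc, rfl⟩
    · rintro ⟨c, hc, rfl⟩
      obtain ⟨r, hr, hRr⟩ := hcompl c hc
      exact ⟨r, hr, f2 r c (hrsub r hr) hRr⟩
  -- step 3: on the dedup'd image, multiplicity = class size
  have hcount : ∀ k ∈ PySem.Set.ofList ((frOf g).map (rootp pF)),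
      ((frOf g).map (rootp pF)).count k = (classOf (frOf g) k).length := by
    intro k hk
    rw [PySem.Set.mem_ofList] at hk
    obtain ⟨c0, hc0, rfl⟩ := List.mem_map.1 hk
    have hkfr := (f1 c0 hc0).1
    have hfix := f3 c0 hc0
    have hcls := classOf_spec (frOf g) hb hN hlen hkfr
    rw [List.count_eq_countP, List.countP_map]
    have : (frOf g).countP ((fun x => x == rootp pF c0) ∘ rootp pF)
        = (frOf g).countP (fun c => decide (c ∈ classOf (frOf g) (rootp pF c0))) := by
      apply List.countP_congr
      intro c hc
      simp only [Function.comp, beq_iff_eq, decide_eq_true_eq]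
      rw [hcls.2 c]
      exact hiff c hc (rootp pF c0) hkfr hfix
    rw [this]
    exact countP_mem_eq_length hcls.1 hN (fun x hx => Rr_mem hkfr ((hcls.2 x).1 hx))
  -- assemble
  rw [step1, hperm2.countP_eq]
  apply List.countP_congr
  intro k hk
  simp only [Function.comp, badL]
  rw [hcount k hk]

-- ===== VERDICT (by name: the statement is the Claim_ definition above) =====
theorem compute_pocket_score_spec : Claim_equal_compute_pocket_score := by
  intro grey_cells _
  exact A_eq_B grey_cells
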